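-- pv_equiv track=rewrite | github.com/ddis1004/coding_test | python/15685 dragon curve.py | clockwise
-- ===== SOURCE A (Python) =====
-- def clockwise(points, time = 1):
--     time = time % 4
--     if time == 0:
--         return points
--     elif time == 1:
--         return [(-p[1], p[0]) for p in points]
--     elif time == 2:
--         return [(-p[0], -p[1]) for p in points]
--     elif time == 3:
--         return [(p[1], -p[0]) for p in points]
-- ===== SOURCE B (Python) =====
-- def clockwise(points, time = 1):
--     for _ in range(time % 4):
--         points = [(-y, x) for (x, y) in points]
--     return points
-- ===== Notes on version B (the rewrite author's own statement) =====
-- stated objective: alternative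
-- what changed: Instead of selecting one of four precomputed rotation formulas by branching on time % 4, B iterates the single quarter-turn map (x,y) -> (-y,x) time % 4 times; correct because a clockwise rotation by k quarter turns is the k-fold composition of one quarter turn.
import Mathlib
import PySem

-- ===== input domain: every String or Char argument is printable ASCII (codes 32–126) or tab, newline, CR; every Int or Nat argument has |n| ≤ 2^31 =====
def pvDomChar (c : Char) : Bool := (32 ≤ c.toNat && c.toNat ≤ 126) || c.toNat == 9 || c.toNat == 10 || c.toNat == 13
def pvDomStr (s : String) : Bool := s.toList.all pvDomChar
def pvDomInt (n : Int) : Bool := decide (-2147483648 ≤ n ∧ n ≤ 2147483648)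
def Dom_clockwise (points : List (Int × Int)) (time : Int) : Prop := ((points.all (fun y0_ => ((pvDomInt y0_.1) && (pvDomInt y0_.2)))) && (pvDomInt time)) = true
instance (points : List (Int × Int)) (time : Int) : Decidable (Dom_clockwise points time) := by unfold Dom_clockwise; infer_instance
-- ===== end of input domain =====

-- B iterates the single quarter-turn map (x,y) ↦ (-y,x) time % 4 times instead of
-- branching to one of four precomputed formulas (objective: alternative).

-- ===== PORT A =====
def clockwise (points : List (Int × Int)) (time : Int) : List (Int × Int) :=
  let time := PySem.Int.mod time 4
  if time = 0 then points
  else if time = 1 then points.map (fun p => (-p.2, p.1))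
  else if time = 2 then points.map (fun p => (-p.1, -p.2))
  else if time = 3 then points.map (fun p => (p.2, -p.1))
  else []  -- unreachable (time % 4 ∈ {0,1,2,3})

-- ===== PORT B =====
-- the 'for _ in range(time % 4)' loop of Source B as a foldl over the same range
def clockwise_alt (points : List (Int × Int)) (time : Int) : List (Int × Int) :=
  (PySem.List.pyRange 0 (PySem.Int.mod time 4) 1).foldl
    (fun ps _ => ps.map (fun p => (-p.2, p.1))) points

-- ===== PRECONDITION & SPEC =====
def Spec_clockwise (points : List (Int × Int)) (time : Int) (out : List (Int × Int)) : Prop := out = clockwise_alt points time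
instance (points : List (Int × Int)) (time : Int) (out : List (Int × Int)) : Decidable (Spec_clockwise points time out) := by unfold Spec_clockwise; infer_instance

-- ===== CLAIM =====
def Claim_equal_clockwise : Prop := ∀ (points : List (Int × Int)) (time : Int), Dom_clockwise points time → Spec_clockwise points time (clockwise points time)

-- ===== LEMMAS AND PROOFS =====

theorem pymod_eq_emod (t : Int) : PySem.Int.mod t 4 = t % 4 := by
  simp [PySem.Int.mod, Int.fmod_eq_emod_of_nonneg]

theorem emod4_cases (t : Int) : t % 4 = 0 ∨ t % 4 = 1 ∨ t % 4 = 2 ∨ t % 4 = 3 := by omega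

-- ===== VERDICT =====
theorem clockwise_spec : Claim_equal_clockwise := by
  intro points time _
  unfold Spec_clockwise clockwise clockwise_alt
  rcases emod4_cases time with h | h | h | h <;>
    simp [pymod_eq_emod, h, PySem.List.pyRange_one, List.range_succ, List.map_map,
      Function.comp_def]
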